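-- pv_equiv track=rewrite | github.com/ming-0120/anbu-knocknock | backend/app/repositories/dashboard_repository.py | _levels_from_min
-- ===== SOURCE A (Python) =====
-- _LEVEL_ORDER = {"normal": 0, "watch": 1, "alert": 2, "emergency": 3}
--
-- def _levels_from_min(min_level: str | None):
--     if not min_level:
--         return None
--
--     m = min_level.lower()
--
--     if m not in _LEVEL_ORDER:
--         return None
--
--     min_rank = _LEVEL_ORDER[m]
--
--     return [k for k, v in _LEVEL_ORDER.items() if v >= min_rank]
-- ===== SOURCE B (Python) =====
-- _LEVELS = ("normal", "watch", "alert", "emergency")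
--
-- def _levels_from_min(min_level):
--     if not min_level:
--         return None
--     m = min_level.lower()
--
--     def suffix_from(levels):
--         # recursive scan: drop levels until the head matches m; None if exhausted
--         if not levels:
--             return None
--         if levels[0] == m:
--             return list(levels)
--         return suffix_from(levels[1:])
--
--     return suffix_from(_LEVELS)
-- ===== Notes on version B (the rewrite author's own statement) =====
-- stated objective: alternative
-- what changed: Replaces the rank dict, the membership check and the per-entry v >= min_rank filtering comprehension by a single recursive scan over an ordered level tuple that drops levels until the head equals the lowercased input and returns the remaining suffix (None if the scan exhausts the tuple, which subsumes the membership test).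
import Mathlib
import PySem

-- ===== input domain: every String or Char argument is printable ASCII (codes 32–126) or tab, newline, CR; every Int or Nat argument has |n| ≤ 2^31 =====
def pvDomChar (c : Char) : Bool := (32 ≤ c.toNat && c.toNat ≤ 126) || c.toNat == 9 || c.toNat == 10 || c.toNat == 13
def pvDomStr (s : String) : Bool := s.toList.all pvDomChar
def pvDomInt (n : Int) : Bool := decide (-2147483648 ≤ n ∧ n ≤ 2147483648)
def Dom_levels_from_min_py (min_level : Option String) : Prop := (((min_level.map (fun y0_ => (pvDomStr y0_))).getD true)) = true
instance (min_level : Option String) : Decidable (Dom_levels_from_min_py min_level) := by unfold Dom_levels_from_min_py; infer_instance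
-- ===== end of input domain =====

-- B replaces A's rank dict + membership check + filtering comprehension by one
-- recursive scan of an ordered level list returning the matching suffix (alternative).

-- ===== PORT A =====
def pvLevelOrder : PySem.Dict String Int :=
  PySem.Dict.ofList [("normal", 0), ("watch", 1), ("alert", 2), ("emergency", 3)]

def levels_from_min_py (min_level : Option String) : Option (List String) :=
  match min_level with
  | none => none
  | some s =>
    if s = "" then none
    else
      let m := PySem.Str.lower s
      if ¬ pvLevelOrder.contains m then none
      else
        let min_rank := pvLevelOrder.getD m 0
        some ((pvLevelOrder.items.filter (fun kv => kv.2 ≥ min_rank)).map (·.1))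

-- ===== PORT B =====
def pvLevels : List String := ["normal", "watch", "alert", "emergency"]

-- recursive helper: drop levels until the head equals m; none if exhausted
def pvSuffixFrom (m : String) : List String → Option (List String)
  | [] => none
  | x :: xs => if x = m then some (x :: xs) else pvSuffixFrom m xs

def levels_from_min_py_alt (min_level : Option String) : Option (List String) :=
  match min_level with
  | none => none
  | some s =>
    if s = "" then none
    else pvSuffixFrom (PySem.Str.lower s) pvLevels

-- ===== PRECONDITION & SPEC =====
def Spec_levels_from_min_py (min_level : Option String) (out : Option (List String)) : Prop := out = levels_from_min_py_alt min_level
instance (min_level : Option String) (out : Option (List String)) : Decidable (Spec_levels_from_min_py min_level out) := by unfold Spec_levels_from_min_py; infer_instance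

-- ===== CLAIM (what is proved, stated in full; the proofs are below) =====
def Claim_equal_levels_from_min_py : Prop := ∀ (min_level : Option String), Dom_levels_from_min_py min_level → Spec_levels_from_min_py min_level (levels_from_min_py min_level)

-- ===== LEMMAS AND PROOFS =====

-- Both sides depend only on the lowercased string m: on each of the four level
-- names both compute to the same literal list; otherwise both are none.
lemma pv_core_eq (m : String) :
    (if ¬ pvLevelOrder.contains m then (none : Option (List String))
     else
       let min_rank := pvLevelOrder.getD m 0
       some ((pvLevelOrder.items.filter (fun kv => kv.2 ≥ min_rank)).map (·.1)))
    = pvSuffixFrom m pvLevels := by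
  by_cases h1 : m = "normal"; · subst h1; decide
  by_cases h2 : m = "watch"; · subst h2; decide
  by_cases h3 : m = "alert"; · subst h3; decide
  by_cases h4 : m = "emergency"; · subst h4; decide
  have hc : pvLevelOrder.contains m = false := by
    have hitems : pvLevelOrder.items = [("normal", 0), ("watch", 1), ("alert", 2), ("emergency", 3)] := by rfl
    simp [PySem.Dict.contains, hitems]
    exact ⟨fun h => h1 h.symm, fun h => h2 h.symm, fun h => h3 h.symm, fun h => h4 h.symm⟩
  have hb : pvSuffixFrom m pvLevels = none := by
    simp only [pvLevels, pvSuffixFrom]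
    rw [if_neg (fun h => h1 h.symm), if_neg (fun h => h2 h.symm),
      if_neg (fun h => h3 h.symm), if_neg (fun h => h4 h.symm)]
  rw [hb]; simp [hc]

-- ===== VERDICT (by name: the statement is the Claim_ definition above) =====
theorem levels_from_min_py_spec : Claim_equal_levels_from_min_py := by
  intro min_level _
  unfold Spec_levels_from_min_py levels_from_min_py levels_from_min_py_alt
  match min_level with
  | none => rfl
  | some s =>
    by_cases hs : s = ""
    · simp [hs]
    · simp only [if_neg hs]
      exact pv_core_eq (PySem.Str.lower s)
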